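-- pv_equiv track=rewrite | github.com/lucascust/alocador-de-memoria | alocadorDeMemoria/funcoes.py | dicionarioDeEntrada
-- ===== SOURCE A (Python) =====
-- def dicionarioDeEntrada(processos):
--     temposEntrada ={}
--     processoAtual=0
--     for i in processos:
--         if (i[0] in temposEntrada):#processos[2] é tempo de chegada
--             temposEntrada[i[0]].append(processoAtual)
--         else:
--             temposEntrada[i[0]]= [processoAtual]
--         processoAtual+=1
--     #dicionário com os tempos de entrada dos processos = {ciclo de entrada:nº do processo,...}
--     return temposEntrada
-- ===== SOURCE B (Python) =====
-- def dicionarioDeEntrada(processos):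
--     # Two-pass: list of arrival times, ordered dedup of the keys, then one
--     # scan per distinct key collecting the indices that arrive at that time.
--     chegadas = [p[0] for p in processos]
--     chaves = list(dict.fromkeys(chegadas))
--     return {t: [j for j, c in enumerate(chegadas) if c == t] for t in chaves}
-- ===== Notes on version B (the rewrite author's own statement) =====
-- stated objective: alternative
-- what changed: Replaces the single hashing pass that mutates a dict entry per process with a two-pass strategy: extract arrival times, ordered-dedup the keys with dict.fromkeys, then build each group by scanning enumerate(chegadas) for that key.
-- outside the precondition, e.g. on dicionarioDeEntrada([[1, 2], []]): A raises IndexError, B raises IndexError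
import Mathlib
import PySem

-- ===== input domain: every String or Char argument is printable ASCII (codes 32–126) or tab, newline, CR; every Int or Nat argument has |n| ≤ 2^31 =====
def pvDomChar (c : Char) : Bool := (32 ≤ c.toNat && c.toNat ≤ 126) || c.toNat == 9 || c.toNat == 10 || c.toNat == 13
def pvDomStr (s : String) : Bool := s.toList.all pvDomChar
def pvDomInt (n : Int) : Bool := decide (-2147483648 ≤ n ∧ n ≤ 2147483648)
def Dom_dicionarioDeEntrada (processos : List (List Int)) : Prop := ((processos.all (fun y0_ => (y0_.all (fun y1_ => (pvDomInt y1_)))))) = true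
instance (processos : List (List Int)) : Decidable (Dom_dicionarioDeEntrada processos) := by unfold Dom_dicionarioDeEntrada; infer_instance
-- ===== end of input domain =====

-- B replaces A's single insert-or-append hashing pass by a two-pass strategy
-- (ordered dedup of arrival times, then one index scan per distinct key);
-- objective: alternative (same result, different algorithm, no speed claim).


-- ===== PORT A =====
-- for-loop over processos carrying the dict and the counter processoAtual;
-- i[0] is ported as (pyGet? i 0).getD 0 — exact under Pre_ (every i nonempty).
def dicionarioDeEntrada (processos : List (List Int)) : List (Int × List Int) :=
  (processos.foldl
    (fun (st : PySem.Dict Int (List Int) × Int) i =>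
      let k := (PySem.List.pyGet? i 0).getD 0
      (if st.1.contains k then st.1.modify k [] (· ++ [st.2]) else st.1.insert k [st.2],
       st.2 + 1))
    (PySem.Dict.empty, 0)).1.items

-- ===== PORT B =====
-- chegadas = [p[0] for p in processos]; chaves = list(dict.fromkeys(chegadas));
-- {t: [j for j, c in enumerate(chegadas) if c == t] for t in chaves}
def dicionarioDeEntrada_alt (processos : List (List Int)) : List (Int × List Int) :=
  let chegadas := processos.map (fun p => (PySem.List.pyGet? p 0).getD 0)
  let chaves := PySem.List.dedup chegadas
  chaves.map (fun t =>
    (t, ((PySem.List.enumerate chegadas).filter (fun jc => jc.2 == t)).map (fun jc => jc.1)))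

-- ===== PRECONDITION & SPEC =====
-- Pre_ excludes inputs containing an empty inner list, on which A (and B) raise IndexError at i[0]/p[0].
def Pre_dicionarioDeEntrada (processos : List (List Int)) : Prop :=
  ∀ i ∈ processos, i ≠ []
instance (processos : List (List Int)) : Decidable (Pre_dicionarioDeEntrada processos) := by unfold Pre_dicionarioDeEntrada; infer_instance
def pvWitness_dicionarioDeEntrada : List (List Int) := [[1, 5], [2, 3], [1, 7]]
def Spec_dicionarioDeEntrada (processos : List (List Int)) (out : List (Int × List Int)) : Prop := out = dicionarioDeEntrada_alt processos
instance (processos : List (List Int)) (out : List (Int × List Int)) : Decidable (Spec_dicionarioDeEntrada processos out) := by unfold Spec_dicionarioDeEntrada; infer_instance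

-- ===== CLAIM (what is proved, stated in full; the proofs are below) =====
def Claim_equal_dicionarioDeEntrada : Prop := ∀ (processos : List (List Int)), Dom_dicionarioDeEntrada processos → Pre_dicionarioDeEntrada processos → Spec_dicionarioDeEntrada processos (dicionarioDeEntrada processos)

-- ===== LEMMAS AND PROOFS =====

-- A's if/else branch is exactly Dict.modify (append to existing list, else start [v]).
theorem pv_branch_eq_modify (d : PySem.Dict Int (List Int)) (k v : Int) :
    (if d.contains k then d.modify k [] (· ++ [v]) else d.insert k [v]) =
      d.modify k [] (· ++ [v]) := by
  by_cases h : d.contains k = true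
  · simp [h]
  · simp only [Bool.not_eq_true] at h
    simp [h, PySem.Dict.modify, PySem.Dict.getD_of_not_contains d [] h]

-- A's loop state: the dict is a pure modify-fold over the (arrival, index) pairs.
theorem pv_fold_eq (xs : List (List Int)) (d : PySem.Dict Int (List Int)) (n : Int) :
    (xs.foldl
      (fun (st : PySem.Dict Int (List Int) × Int) i =>
        let k := (PySem.List.pyGet? i 0).getD 0
        (if st.1.contains k then st.1.modify k [] (· ++ [st.2]) else st.1.insert k [st.2],
         st.2 + 1))
      (d, n)).1 =
      ((PySem.List.enumerate (xs.map (fun p => (PySem.List.pyGet? p 0).getD 0)) n).map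
        (fun jc => (jc.2, jc.1))).foldl
        (fun d p => d.modify p.1 [] (· ++ [p.2])) d := by
  induction xs generalizing d n with
  | nil => rfl
  | cons a xs ih =>
    simp only [List.foldl_cons, List.map_cons, PySem.List.enumerate]
    rw [pv_branch_eq_modify, ih]

theorem dicionarioDeEntrada_eq_alt (processos : List (List Int)) :
    dicionarioDeEntrada processos = dicionarioDeEntrada_alt processos := by
  unfold dicionarioDeEntrada dicionarioDeEntrada_alt
  rw [pv_fold_eq]
  set chegadas := processos.map (fun p => (PySem.List.pyGet? p 0).getD 0) with hch
  set l := (PySem.List.enumerate chegadas 0).map (fun jc => (jc.2, jc.1)) with hl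
  set D := l.foldl (fun d p => d.modify p.1 [] (· ++ [p.2])) (PySem.Dict.empty (κ := Int) (ν := List Int)) with hD
  have hfst : l.map (fun p => p.1) = chegadas := by
    rw [hl, List.map_map]
    exact PySem.List.map_snd_enumerate chegadas 0
  have hkeys : D.keys = PySem.Set.ofList chegadas := by
    rw [hD]
    rw [PySem.Dict.keys_foldl_modify_key l (fun p => p.1) [] (fun d p v => v ++ [p.2])
      PySem.Dict.empty, hfst]
    rfl
  have hnd : D.keys.Nodup := by rw [hkeys]; exact PySem.Set.nodup_ofList _
  rw [PySem.Dict.items_eq_map_keys D hnd [], hkeys]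
  have hdedup : PySem.List.dedup chegadas = PySem.Set.ofList chegadas := rfl
  show _ = (PySem.List.dedup chegadas).map (fun t =>
    (t, ((PySem.List.enumerate chegadas).filter (fun jc => jc.2 == t)).map (fun jc => jc.1)))
  rw [hdedup]
  apply List.map_congr_left
  intro t _
  have hget : D.getD t [] = (l.filter (fun p => p.1 == t)).map (fun p => p.2) := by
    rw [hD, PySem.Dict.getD_foldl_modify_append l PySem.Dict.empty t]
    simp
  rw [hget, hl, List.filter_map]
  simp [Function.comp_def]

-- ===== VERDICT (by name: the statement is the Claim_ definition above) =====
theorem dicionarioDeEntrada_spec : Claim_equal_dicionarioDeEntrada := by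
  intro processos _ _
  unfold Spec_dicionarioDeEntrada
  exact dicionarioDeEntrada_eq_alt processos
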